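-- pv_equiv track=rewrite | github.com/super30admin/Greedy-4 | Problem-2.py | check
-- ===== SOURCE A (Python) =====
-- def check(A,B,num):
--     cntA=0
--     cntB=0
--     for i in range(len(A)):
--         if(A[i]!=num and B[i]!=num):
--             return -1
--
--         if(A[i]!=num):
--             cntA+=1
--         elif(B[i]!=num):
--             cntB+=1
--     return min(cntA,cntB)
-- ===== SOURCE B (Python) =====
-- def check(A, B, num):
--     if any(A[i] != num and B[i] != num for i in range(len(A))):
--         return -1
--     cntA = sum(1 for i in range(len(A)) if A[i] != num)
--     cntB = sum(1 for i in range(len(A)) if B[i] != num)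
--     return min(cntA, cntB)
-- ===== Notes on version B (the rewrite author's own statement) =====
-- stated objective: simpler
-- what changed: Replaces the fused single loop with accumulators and an early return by a validation pass (any) followed by two independent whole-array counts, using the fact that after validation B[i]!=num implies A[i]==num.
import Mathlib
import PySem

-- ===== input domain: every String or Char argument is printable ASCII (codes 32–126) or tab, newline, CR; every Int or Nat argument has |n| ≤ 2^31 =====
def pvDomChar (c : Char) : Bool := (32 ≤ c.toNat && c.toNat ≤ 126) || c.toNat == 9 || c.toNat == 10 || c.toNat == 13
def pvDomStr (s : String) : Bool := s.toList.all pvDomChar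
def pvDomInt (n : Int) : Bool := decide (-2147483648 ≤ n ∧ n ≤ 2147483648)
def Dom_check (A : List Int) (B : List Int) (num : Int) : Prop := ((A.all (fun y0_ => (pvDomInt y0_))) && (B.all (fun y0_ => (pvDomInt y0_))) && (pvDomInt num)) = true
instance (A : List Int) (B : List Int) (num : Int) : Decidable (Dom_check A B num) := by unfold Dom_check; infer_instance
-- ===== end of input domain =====

-- B is a simpler decomposition of A (validate, then two whole-array counts); equivalence is on Pre_check,
-- exactly the inputs where the Python A returns (elsewhere it raises IndexError reading B[i]).

-- xs[i] for the Nat indices produced by range(len(A)); indices are non-negative, so Python indexing is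
-- plain positional lookup; an out-of-range read of B (IndexError in Python) is excluded by Pre_check,
-- the default 0 is never the value of a read the claim covers.
def pvIdx (xs : List Int) (i : Nat) : Int := xs.getD i 0

-- ===== PORT A =====
-- the for-loop of A: state (cntA, cntB), early return -1, same branch order
def checkGo (A B : List Int) (num : Int) : List Nat → Int → Int → Int
  | [], cntA, cntB => min cntA cntB
  | i :: rest, cntA, cntB =>
    if pvIdx A i ≠ num ∧ pvIdx B i ≠ num then -1
    else if pvIdx A i ≠ num then checkGo A B num rest (cntA + 1) cntB
    else if pvIdx B i ≠ num then checkGo A B num rest cntA (cntB + 1)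
    else checkGo A B num rest cntA cntB

def check (A : List Int) (B : List Int) (num : Int) : Int :=
  checkGo A B num (List.range A.length) 0 0

-- ===== PORT B =====
def check_alt (A : List Int) (B : List Int) (num : Int) : Int :=
  if (List.range A.length).any (fun i => decide (pvIdx A i ≠ num ∧ pvIdx B i ≠ num)) then -1
  else
    let cntA : Int := ((List.range A.length).countP (fun i => decide (pvIdx A i ≠ num)) : Nat)
    let cntB : Int := ((List.range A.length).countP (fun i => decide (pvIdx B i ≠ num)) : Nat)
    min cntA cntB

-- ===== PRECONDITION & SPEC =====
-- Pre_check is exactly the set of inputs on which Python A returns: either B is long enough for every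
-- read, or an in-range pair differing from num on both sides makes A return -1 before any bad read.
def Pre_check (A : List Int) (B : List Int) (num : Int) : Prop :=
  A.length ≤ B.length ∨
    ∃ i < min A.length B.length, A.getD i 0 ≠ num ∧ B.getD i 0 ≠ num
instance (A : List Int) (B : List Int) (num : Int) : Decidable (Pre_check A B num) := by
  unfold Pre_check; infer_instance

def pvWitness_check : List Int × List Int × Int := ([1, 2], [2, 1], 2)

def Spec_check (A : List Int) (B : List Int) (num : Int) (out : Int) : Prop := out = check_alt A B num
instance (A : List Int) (B : List Int) (num : Int) (out : Int) : Decidable (Spec_check A B num out) := by unfold Spec_check; infer_instance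

-- ===== CLAIM (what is proved, stated in full; the proofs are below) =====
def Claim_equal_check : Prop := ∀ (A : List Int) (B : List Int) (num : Int), Dom_check A B num → Pre_check A B num → Spec_check A B num (check A B num)

-- ===== LEMMAS AND PROOFS =====

-- if some index in l is a both-different index, the loop returns -1 whatever the accumulators are
lemma checkGo_neg (A B : List Int) (num : Int) (l : List Nat)
    (h : ∃ i ∈ l, pvIdx A i ≠ num ∧ pvIdx B i ≠ num) (cntA cntB : Int) :
    checkGo A B num l cntA cntB = -1 := by
  induction l generalizing cntA cntB with
  | nil => simp at h
  | cons i rest ih =>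
    by_cases hbd : pvIdx A i ≠ num ∧ pvIdx B i ≠ num
    · simp [checkGo, hbd]
    · have htail : ∃ j ∈ rest, pvIdx A j ≠ num ∧ pvIdx B j ≠ num := by
        rcases h with ⟨j, hj, hjp⟩
        rcases List.mem_cons.mp hj with rfl | hj'
        · exact absurd hjp hbd
        · exact ⟨j, hj', hjp⟩
      simp only [checkGo, if_neg hbd]
      split_ifs <;> exact ih htail _ _

-- if no index in l is both-different, the loop computes the two independent counts of B's phases
lemma checkGo_eq (A B : List Int) (num : Int) (l : List Nat)
    (h : ∀ i ∈ l, ¬(pvIdx A i ≠ num ∧ pvIdx B i ≠ num)) (cntA cntB : Int) :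
    checkGo A B num l cntA cntB =
      min (cntA + (l.countP (fun i => decide (pvIdx A i ≠ num)) : Nat))
          (cntB + (l.countP (fun i => decide (pvIdx B i ≠ num)) : Nat)) := by
  induction l generalizing cntA cntB with
  | nil => simp [checkGo]
  | cons i rest ih =>
    have hi := h i (List.mem_cons_self ..)
    have htail : ∀ j ∈ rest, ¬(pvIdx A j ≠ num ∧ pvIdx B j ≠ num) :=
      fun j hj => h j (List.mem_cons_of_mem _ hj)
    by_cases ha : pvIdx A i ≠ num
    · have hb : pvIdx B i = num := by
        by_contra hb; exact hi ⟨ha, hb⟩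
      rw [checkGo, if_neg hi, if_pos ha, ih htail]
      simp [ha, hb]
      omega
    · rw [not_not] at ha
      by_cases hb : pvIdx B i ≠ num
      · rw [checkGo, if_neg hi, if_neg (by simp [ha]), if_pos hb, ih htail]
        simp [ha, hb]
        omega
      · rw [not_not] at hb
        rw [checkGo, if_neg hi, if_neg (by simp [ha]), if_neg (by simp [hb]), ih htail]
        simp [ha, hb]

lemma check_eq_check_alt (A B : List Int) (num : Int) : check A B num = check_alt A B num := by
  by_cases h : ∃ i ∈ List.range A.length, pvIdx A i ≠ num ∧ pvIdx B i ≠ num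
  · have hany : (List.range A.length).any
        (fun i => decide (pvIdx A i ≠ num ∧ pvIdx B i ≠ num)) = true := by
      rcases h with ⟨i, hi, hp⟩
      exact List.any_eq_true.mpr ⟨i, hi, by simpa using hp⟩
    rw [check, check_alt, if_pos hany, checkGo_neg A B num _ h]
  · have h' : ∀ i ∈ List.range A.length, ¬(pvIdx A i ≠ num ∧ pvIdx B i ≠ num) :=
      fun i hi hp => h ⟨i, hi, hp⟩
    have hany : (List.range A.length).any
        (fun i => decide (pvIdx A i ≠ num ∧ pvIdx B i ≠ num)) = false := by
      simp only [List.any_eq_false]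
      intro i hi
      simpa using h' i hi
    rw [check, checkGo_eq A B num _ h']
    simp only [check_alt, hany]
    simp

-- ===== VERDICT (by name: the statement is the Claim_ definition above) =====
theorem check_spec : Claim_equal_check := by
  intro A B num _ _
  exact check_eq_check_alt A B num
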